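-- pv_equiv track=rewrite | github.com/NicholAI91/Socratic_Mandate_Framework.md | shell.py | _determine_consent_tier
-- ===== SOURCE A (Python) =====
-- from enum import Enum
-- from typing import Optional, List, Dict, Any
--
-- class ConsentTier(str, Enum):
--     """Risk-based consent tiers (Pillar III)."""
--     DEFAULT = "default"        # Implicit consent
--     SENSITIVE = "sensitive"    # Explicit acknowledgment required
--     RESEARCH = "research"      # Written justification + supervisor
--     FORENSIC = "forensic"      # Full audit trail + mandatory escalation
--
-- def _determine_consent_tier(topics: List[str]) -> ConsentTier:
--     """Pillar III: Determine required consent tier."""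
--     if "crisis" in topics:
--         return ConsentTier.FORENSIC
--     elif any(t in topics for t in ["medical", "legal"]):
--         return ConsentTier.SENSITIVE
--     elif "financial" in topics:
--         return ConsentTier.SENSITIVE
--     return ConsentTier.DEFAULT
-- ===== SOURCE B (Python) =====
-- from enum import Enum
-- from typing import List
--
-- class ConsentTier(str, Enum):
--     DEFAULT = "default"
--     SENSITIVE = "sensitive"
--     RESEARCH = "research"
--     FORENSIC = "forensic"
--
-- _TIER_RANK = {
--     "crisis": (3, ConsentTier.FORENSIC),
--     "medical": (2, ConsentTier.SENSITIVE),
--     "legal": (2, ConsentTier.SENSITIVE),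
--     "financial": (2, ConsentTier.SENSITIVE),
-- }
--
-- def _determine_consent_tier(topics: List[str]) -> ConsentTier:
--     best = (0, ConsentTier.DEFAULT)
--     for t in topics:
--         r = _TIER_RANK.get(t)
--         if r is not None and r[0] > best[0]:
--             best = r
--     return best[1]
-- ===== Notes on version B (the rewrite author's own statement) =====
-- stated objective: alternative
-- what changed: Replaced A's chain of keyword-membership tests (each scanning the topic list) by a single pass over the input topics that tracks the maximum severity rank via a keyword->(rank,tier) table.
import Mathlib
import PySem

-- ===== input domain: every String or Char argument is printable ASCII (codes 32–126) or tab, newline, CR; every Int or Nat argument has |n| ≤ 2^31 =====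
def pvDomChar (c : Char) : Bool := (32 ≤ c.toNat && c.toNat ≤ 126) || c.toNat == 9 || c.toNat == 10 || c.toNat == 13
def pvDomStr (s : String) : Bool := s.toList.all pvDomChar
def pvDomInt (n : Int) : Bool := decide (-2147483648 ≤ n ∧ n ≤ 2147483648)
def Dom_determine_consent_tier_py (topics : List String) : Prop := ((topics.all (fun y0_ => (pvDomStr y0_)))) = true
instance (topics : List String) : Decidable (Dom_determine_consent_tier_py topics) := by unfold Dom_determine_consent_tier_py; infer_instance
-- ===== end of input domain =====

-- B replaces A's chain of keyword-membership tests by one pass over the input topics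
-- tracking the maximum severity rank via a keyword -> (rank, tier) table (objective: alternative).

-- ===== PORT A =====
def determine_consent_tier_py (topics : List String) : String :=
  if "crisis" ∈ topics then "forensic"
  else if (["medical", "legal"].any (fun t => t ∈ topics)) then "sensitive"
  else if "financial" ∈ topics then "sensitive"
  else "default"

-- ===== PORT B =====
def pvTierRank : PySem.Dict String (Int × String) :=
  PySem.Dict.ofList
    [("crisis", ((3 : Int), "forensic")), ("medical", ((2 : Int), "sensitive")),
     ("legal", ((2 : Int), "sensitive")), ("financial", ((2 : Int), "sensitive"))]

def pvTierStep (best : Int × String) (t : String) : Int × String :=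
  match PySem.Dict.get? pvTierRank t with
  | some r => if r.1 > best.1 then r else best
  | none => best

def determine_consent_tier_py_alt (topics : List String) : String :=
  (topics.foldl pvTierStep (0, "default")).2

-- ===== PRECONDITION & SPEC =====
def Spec_determine_consent_tier_py (topics : List String) (out : String) : Prop := out = determine_consent_tier_py_alt topics
instance (topics : List String) (out : String) : Decidable (Spec_determine_consent_tier_py topics out) := by unfold Spec_determine_consent_tier_py; infer_instance

-- ===== CLAIM (what is proved, stated in full; the proofs are below) =====
def Claim_equal_determine_consent_tier_py : Prop := ∀ (topics : List String), Dom_determine_consent_tier_py topics → Spec_determine_consent_tier_py topics (determine_consent_tier_py topics)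

-- ===== LEMMAS AND PROOFS =====

-- Characterisation of B's fold from any of the three reachable states.
theorem pvFold_char (ts : List String) (b : Int × String)
    (hb : b = (0, "default") ∨ b = (2, "sensitive") ∨ b = (3, "forensic")) :
    ts.foldl pvTierStep b =
      (if b.1 = 3 ∨ "crisis" ∈ ts then ((3 : Int), "forensic")
       else if b.1 = 2 ∨ "medical" ∈ ts ∨ "legal" ∈ ts ∨ "financial" ∈ ts then ((2 : Int), "sensitive")
       else ((0 : Int), "default")) := by
  induction ts generalizing b with
  | nil =>
    rcases hb with h | h | h <;> subst h <;> simp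
  | cons t ts ih =>
    rw [List.foldl_cons]
    by_cases h1 : t = "crisis"
    · subst h1
      have hstep : pvTierStep b "crisis" = (3, "forensic") := by
        rcases hb with h | h | h <;> subst h <;> decide
      rw [hstep, ih _ (by simp)]
      simp
    · by_cases h2 : t = "medical"
      · subst h2
        rcases hb with h | h | h <;> subst h <;>
          [rw [show pvTierStep (0, "default") "medical" = (2, "sensitive") from by decide,
              ih _ (by simp)];
           rw [show pvTierStep (2, "sensitive") "medical" = (2, "sensitive") from by decide,
              ih _ (by simp)];
           rw [show pvTierStep (3, "forensic") "medical" = (3, "forensic") from by decide,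
              ih _ (by simp)]] <;> simp
      · by_cases h3 : t = "legal"
        · subst h3
          rcases hb with h | h | h <;> subst h <;>
            [rw [show pvTierStep (0, "default") "legal" = (2, "sensitive") from by decide,
                ih _ (by simp)];
             rw [show pvTierStep (2, "sensitive") "legal" = (2, "sensitive") from by decide,
                ih _ (by simp)];
             rw [show pvTierStep (3, "forensic") "legal" = (3, "forensic") from by decide,
                ih _ (by simp)]] <;> simp
        · by_cases h4 : t = "financial"
          · subst h4
            rcases hb with h | h | h <;> subst h <;>
              [rw [show pvTierStep (0, "default") "financial" = (2, "sensitive") from by decide,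
                  ih _ (by simp)];
               rw [show pvTierStep (2, "sensitive") "financial" = (2, "sensitive") from by decide,
                  ih _ (by simp)];
               rw [show pvTierStep (3, "forensic") "financial" = (3, "forensic") from by decide,
                  ih _ (by simp)]] <;> simp
          · have hrk : pvTierRank = PySem.Dict.mk
                [("crisis", ((3 : Int), "forensic")), ("medical", ((2 : Int), "sensitive")),
                 ("legal", ((2 : Int), "sensitive")), ("financial", ((2 : Int), "sensitive"))] := by
              decide
            have hget : pvTierRank.get? t = none := by
              rw [hrk]
              simp [PySem.Dict.get?, Ne.symm h1, Ne.symm h2, Ne.symm h3, Ne.symm h4]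
            have hstep : pvTierStep b t = b := by
              simp [pvTierStep, hget]
            rw [hstep, ih _ hb]
            simp [List.mem_cons, Ne.symm h1, Ne.symm h2, Ne.symm h3, Ne.symm h4]

-- ===== VERDICT (by name: the statement is the Claim_ definition above) =====
theorem determine_consent_tier_py_spec : Claim_equal_determine_consent_tier_py := by
  intro topics _
  unfold Spec_determine_consent_tier_py determine_consent_tier_py determine_consent_tier_py_alt
  rw [pvFold_char topics (0, "default") (Or.inl rfl)]
  by_cases hc : "crisis" ∈ topics <;>
    by_cases hm : "medical" ∈ topics <;>
      by_cases hl : "legal" ∈ topics <;>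
        by_cases hf : "financial" ∈ topics <;>
          simp [hc, hm, hl, hf]
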